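-- pv_equiv track=rewrite | github.com/zeionara/aligned_bert_embedder | aligned_bert_embedder/utils/alignment.py | reduce_max_list
-- ===== SOURCE A (Python) =====
-- def reduce_max_list(ls):
--     if len(ls) == 1:
--         return ls[0]
--     max_ls = ls[0]
--     for item in ls[1:]:
--         for index, value in enumerate(item):
--             if value > max_ls[index]:
--                 max_ls[index] = value
--     return max_ls
-- ===== SOURCE B (Python) =====
-- def reduce_max_list(ls):
--     if len(ls) == 1:
--         return ls[0]
--     result = ls[0]
--     rest = ls[1:]
--     for i in range(len(result)):
--         result[i] = max([result[i]] + [item[i] for item in rest if i < len(item)])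
--     return result
-- ===== Notes on version B (the rewrite author's own statement) =====
-- stated objective: alternative
-- what changed: B computes the result column-by-column: each output element is one batch max over its whole column (first row plus the i-th entries of all rows that have one), instead of A's row-by-row sweep that accumulates pairwise compare-and-overwrite updates; both mutate ls[0] in place.
import Mathlib
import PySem

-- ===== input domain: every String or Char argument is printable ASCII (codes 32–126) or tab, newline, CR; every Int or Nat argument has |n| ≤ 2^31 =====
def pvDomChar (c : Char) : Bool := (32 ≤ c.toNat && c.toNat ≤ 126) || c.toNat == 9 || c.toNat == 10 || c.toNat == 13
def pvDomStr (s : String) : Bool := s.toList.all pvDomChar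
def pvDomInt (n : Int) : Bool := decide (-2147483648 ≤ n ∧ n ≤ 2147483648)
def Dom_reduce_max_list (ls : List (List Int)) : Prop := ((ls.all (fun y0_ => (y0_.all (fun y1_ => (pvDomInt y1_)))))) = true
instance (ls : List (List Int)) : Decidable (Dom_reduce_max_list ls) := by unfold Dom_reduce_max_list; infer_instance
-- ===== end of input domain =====

-- B replaces A's row-by-row compare-and-overwrite sweep with one batch max per column (objective: alternative);
-- both A and B mutate ls[0] in place in Python — the equivalence proved here is about the return value.

-- ===== PORT A =====
-- inner loop body: 'if value > max_ls[index]: max_ls[index] = value'; index from enumerate is ≥ 0, so .toNat is exact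
def pvAStep (m : List Int) (p : Int × Int) : List Int :=
  match PySem.List.pyGet? m p.1 with
  | some cur => if p.2 > cur then m.set p.1.toNat p.2 else m
  | none => m     -- IndexError in Python; outside Pre_

-- 'for index, value in enumerate(item): ...'
def pvARow (m : List Int) (item : List Int) : List Int :=
  (PySem.List.enumerate item 0).foldl pvAStep m

def reduce_max_list (ls : List (List Int)) : List Int :=
  if ls.length == 1 then ls.headD []     -- return ls[0]
  else
    match ls with
    | [] => []     -- ls[0] raises IndexError; outside Pre_
    | h :: t => t.foldl pvARow h         -- 'for item in ls[1:]'

-- ===== PORT B =====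
-- 'result[i] = max([result[i]] + [item[i] for item in rest if i < len(item)])'
-- (the comprehension is filterMap over pyGet?, exact since i ≥ 0)
def pvBStep (rest : List (List Int)) (res : List Int) (i : Nat) : List Int :=
  res.set i ((PySem.List.max?
    ((PySem.List.pyGet? res (i : Int)).getD 0
      :: rest.filterMap (fun item => PySem.List.pyGet? item (i : Int)))
    (fun x => x)).getD 0)

def reduce_max_list_alt (ls : List (List Int)) : List Int :=
  if ls.length == 1 then ls.headD []     -- return ls[0]
  else
    match ls with
    | [] => []     -- ls[0] raises IndexError; outside Pre_
    | h :: rest => (List.range h.length).foldl (pvBStep rest) h     -- 'for i in range(len(result))'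

-- ===== PRECONDITION & SPEC =====
-- Pre_ excludes exactly the inputs where A raises IndexError: the empty list, and non-singleton
-- lists in which some later row is longer than the first row.
def Pre_reduce_max_list (ls : List (List Int)) : Prop :=
  ls ≠ [] ∧ (ls.length = 1 ∨ ∀ it ∈ ls.tail, it.length ≤ (ls.headD []).length)
instance (ls : List (List Int)) : Decidable (Pre_reduce_max_list ls) := by
  unfold Pre_reduce_max_list; infer_instance

def pvWitness_reduce_max_list : List (List Int) := [[1, -2, 3], [0, 5, 1], [2, 2]]

def Spec_reduce_max_list (ls : List (List Int)) (out : List Int) : Prop := out = reduce_max_list_alt ls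
instance (ls : List (List Int)) (out : List Int) : Decidable (Spec_reduce_max_list ls out) := by unfold Spec_reduce_max_list; infer_instance

-- ===== CLAIM (what is proved, stated in full; the proofs are below) =====
def Claim_equal_reduce_max_list : Prop := ∀ (ls : List (List Int)), Dom_reduce_max_list ls → Pre_reduce_max_list ls → Spec_reduce_max_list ls (reduce_max_list ls)

-- ===== LEMMAS AND PROOFS =====

-- getD after set
theorem pv_getD_set (l : List Int) (k : Nat) (v : Int) (i : Nat) :
    (l.set k v).getD i 0 = if k = i ∧ k < l.length then v else l.getD i 0 := by
  simp only [List.getD_eq_getElem?_getD, List.getElem?_set]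
  split_ifs with h1 h2 h2' <;> simp_all <;> omega

-- A's inner row loop, characterised pointwise (start index generalised)
theorem pvARow_aux (item : List Int) : ∀ (m : List Int) (s : Nat), s + item.length ≤ m.length →
    ((PySem.List.enumerate item (s : Int)).foldl pvAStep m).length = m.length ∧
    ∀ i : Nat, ((PySem.List.enumerate item (s : Int)).foldl pvAStep m).getD i 0 =
      if s ≤ i ∧ i < s + item.length then max (m.getD i 0) (item.getD (i - s) 0)
      else m.getD i 0 := by
  induction item with
  | nil =>
    intro m s hs
    simp [PySem.List.enumerate_nil]
  | cons v vs ih =>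
    intro m s hs
    have hslt : s < m.length := by simp at hs; omega
    have hstep : pvAStep m ((s : Int), v) = if v > m[s] then m.set s v else m := by
      simp [pvAStep, PySem.List.pyGet?_natCast, List.getElem?_eq_getElem hslt]
    have hlen' : (if v > m[s] then m.set s v else m).length = m.length := by
      split <;> simp
    have hcast : (s : Int) + 1 = ((s + 1 : Nat) : Int) := by push_cast; ring
    have hrec := ih (if v > m[s] then m.set s v else m) (s + 1)
      (by rw [hlen']; simp at hs ⊢; omega)
    rw [PySem.List.enumerate_cons, List.foldl_cons, hstep, hcast]
    refine ⟨by rw [hrec.1, hlen'], ?_⟩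
    intro i
    rw [hrec.2 i]
    have hms : m.getD s 0 = m[s] := by
      rw [List.getD_eq_getElem?_getD, List.getElem?_eq_getElem hslt]; rfl
    have hmd : (if v > m[s] then m.set s v else m).getD i 0 =
        if s = i then max (m.getD i 0) v else m.getD i 0 := by
      split_ifs with h1 h2 h3
      · rw [pv_getD_set, if_pos ⟨h2, hslt⟩]
        subst h2
        rw [hms]
        omega
      · rw [pv_getD_set, if_neg (fun hc => h2 hc.1)]
      · subst h3
        rw [hms]
        omega
      · rfl
    by_cases hi : s = i
    · subst hi
      rw [if_neg (by omega : ¬ (s + 1 ≤ s ∧ s < s + 1 + vs.length)), hmd,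
        if_pos rfl, if_pos (by simp : s ≤ s ∧ s < s + (v :: vs).length)]
      simp
    · rw [hmd, if_neg hi]
      by_cases hr : s + 1 ≤ i ∧ i < s + 1 + vs.length
      · rw [if_pos hr, if_pos (by simp; omega : s ≤ i ∧ i < s + (v :: vs).length)]
        have : i - s = (i - (s + 1)) + 1 := by omega
        rw [this]
        simp
      · rw [if_neg hr, if_neg (by simp; omega)]

-- the filterMap column fold equals the row-accumulator fold
theorem pv_col_foldl (t : List (List Int)) : ∀ (i : Nat) (x : Int),
    (t.filterMap (fun it => PySem.List.pyGet? it (i : Int))).foldl max x =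
    t.foldl (fun acc it => if i < it.length then max acc (it.getD i 0) else acc) x := by
  induction t with
  | nil => intro i x; rfl
  | cons it t ih =>
    intro i x
    simp only [PySem.List.pyGet?_natCast] at ih ⊢
    by_cases h : i < it.length
    · simp only [List.filterMap_cons, List.getElem?_eq_getElem h, List.foldl_cons, if_pos h]
      rw [ih]
      congr 1
      rw [List.getD_eq_getElem?_getD, List.getElem?_eq_getElem h]
      rfl
    · simp only [List.filterMap_cons, List.getElem?_eq_none (by omega : it.length ≤ i),
        List.foldl_cons, if_neg h]
      exact ih i x

-- A's outer loop, characterised pointwise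
theorem pvA_fold (t : List (List Int)) : ∀ (h : List Int), (∀ it ∈ t, it.length ≤ h.length) →
    (t.foldl pvARow h).length = h.length ∧
    ∀ i : Nat, i < h.length → (t.foldl pvARow h).getD i 0 =
      t.foldl (fun acc it => if i < it.length then max acc (it.getD i 0) else acc) (h.getD i 0) := by
  induction t with
  | nil => intro h _; exact ⟨rfl, fun i _ => rfl⟩
  | cons it t ih =>
    intro h hle
    have hit : it.length ≤ h.length := hle it (by simp)
    have haux := pvARow_aux it h 0 (by omega)
    rw [Nat.cast_zero] at haux
    have hrowlen : (pvARow h it).length = h.length := haux.1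
    have hrec := ih (pvARow h it) (by rw [hrowlen]; exact fun j hj => hle j (by simp [hj]))
    refine ⟨by rw [List.foldl_cons, hrec.1, hrowlen], ?_⟩
    intro i hi
    rw [List.foldl_cons, hrec.2 i (by rw [hrowlen]; exact hi), List.foldl_cons]
    congr 1
    show (pvARow h it).getD i 0 = _
    unfold pvARow
    rw [haux.2 i]
    simp only [Nat.zero_add, Nat.zero_le, true_and, Nat.sub_zero]

-- B's loop over range, characterised pointwise
theorem pvB_fold (rest : List (List Int)) : ∀ (n : Nat) (h : List Int), n ≤ h.length →
    ((List.range n).foldl (pvBStep rest) h).length = h.length ∧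
    ∀ i : Nat, ((List.range n).foldl (pvBStep rest) h).getD i 0 =
      if i < n then (rest.filterMap (fun item => PySem.List.pyGet? item (i : Int))).foldl max (h.getD i 0)
      else h.getD i 0 := by
  intro n
  induction n with
  | zero => intro h _; simp
  | succ n ih =>
    intro h hn
    have hrec := ih h (by omega)
    set P := (List.range n).foldl (pvBStep rest) h with hP
    have hnP : n < P.length := by rw [hrec.1]; omega
    rw [List.range_succ, List.foldl_append, List.foldl_cons, List.foldl_nil, ← hP]
    have hPn : P.getD n 0 = h.getD n 0 := by rw [hrec.2 n]; simp
    have hstep : pvBStep rest P n =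
        P.set n ((rest.filterMap (fun item => PySem.List.pyGet? item (n : Int))).foldl max (h.getD n 0)) := by
      unfold pvBStep
      rw [PySem.List.pyGet?_natCast, List.getElem?_eq_getElem hnP]
      rw [PySem.List.max?_id_cons]
      congr 2
      rw [← hPn, List.getD_eq_getElem?_getD, List.getElem?_eq_getElem hnP]
      rfl
    rw [hstep]
    refine ⟨by simp [hrec.1], ?_⟩
    intro i
    rw [pv_getD_set, hrec.2 i, hrec.1]
    by_cases hni : n = i
    · subst hni
      rw [if_pos ⟨rfl, by omega⟩, if_pos (by omega : n < n + 1)]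
    · rw [if_neg (fun hc => hni hc.1)]
      by_cases hin : i < n
      · rw [if_pos hin, if_pos (by omega : i < n + 1)]
      · rw [if_neg hin, if_neg (by omega : ¬ i < n + 1)]

-- two Int lists with equal length and equal getD everywhere below the length are equal
theorem pv_list_eq_of_getD (a b : List Int) (hlen : a.length = b.length)
    (hget : ∀ i : Nat, i < a.length → a.getD i 0 = b.getD i 0) : a = b := by
  apply List.ext_getElem hlen
  intro i h1 h2
  have := hget i h1
  rwa [List.getD_eq_getElem?_getD, List.getD_eq_getElem?_getD,
    List.getElem?_eq_getElem h1, List.getElem?_eq_getElem h2] at this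

-- ===== VERDICT (by name: the statement is the Claim_ definition above) =====
theorem reduce_max_list_spec : Claim_equal_reduce_max_list := by
  intro ls _ hpre
  unfold Spec_reduce_max_list reduce_max_list reduce_max_list_alt
  by_cases hone : ls.length == 1
  · simp [hone]
  · simp only [hone, Bool.false_eq_true, if_false]
    obtain ⟨hne, hdisj⟩ := hpre
    match ls, hne with
    | h :: t, _ =>
      have hle : ∀ it ∈ t, it.length ≤ h.length := by
        rcases hdisj with h1 | h1
        · exact absurd h1 (fun hh => hone (by simp [hh]))
        · simpa using h1
      have hA := pvA_fold t h hle
      have hB := pvB_fold t h.length h (le_refl _)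
      apply pv_list_eq_of_getD
      · rw [hA.1, hB.1]
      · intro i hi
        rw [hA.1] at hi
        rw [hA.2 i hi, hB.2 i, if_pos hi, pv_col_foldl]
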